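-- pv_equiv track=rewrite | github.com/Hasan-Kalzi/Kattis-Python3 | src/Py2/Reversed_Binary_Numbers.py | reversed_binary_to_decimal
-- ===== SOURCE A (Python) =====
-- def reversed_binary_to_decimal(binary):
--     decimal, i, n = 0, len(str(binary))-1, 0
--     while binary != 0:
--         dec = binary % 10
--         decimal = decimal + dec * pow(2, i)
--         binary = binary // 10
--         i -= 1
--     return decimal
-- ===== SOURCE B (Python) =====
-- def reversed_binary_to_decimal(binary):
--     n = 0
--     for c in str(binary)[::-1]:
--         n = n * 2 + int(c)
--     return n
-- ===== Notes on version B (the rewrite author's own statement) =====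
-- stated objective: simpler
-- what changed: B replaces A's numeric digit-peeling (%10, //10) with explicit pow(2,i) positional weights by a single Horner fold n = n*2 + int(c) over the reversed string of the input.
import Mathlib
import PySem

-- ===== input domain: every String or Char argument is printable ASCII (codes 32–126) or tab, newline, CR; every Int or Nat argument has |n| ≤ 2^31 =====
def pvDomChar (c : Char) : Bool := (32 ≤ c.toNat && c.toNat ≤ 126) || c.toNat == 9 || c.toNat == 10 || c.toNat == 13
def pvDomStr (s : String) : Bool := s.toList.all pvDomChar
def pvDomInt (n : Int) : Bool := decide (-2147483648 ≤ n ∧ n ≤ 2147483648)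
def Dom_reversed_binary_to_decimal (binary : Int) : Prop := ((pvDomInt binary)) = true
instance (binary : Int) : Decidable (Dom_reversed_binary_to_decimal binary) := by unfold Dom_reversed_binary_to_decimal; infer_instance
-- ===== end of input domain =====

-- B replaces A's numeric digit-peeling with pow(2,i) weights by a Horner fold over the
-- reversed decimal string (objective: simpler). Equivalence proved on Pre_ (0 ≤ binary);
-- A's while loop never terminates for negative input (binary // 10 stays negative).


-- ===== PORT A =====
-- A's while loop, state (binary, decimal, i).  Fuel `binary.natAbs + 1` is a pure
-- totality guard: for 0 ≤ binary the loop runs ≤ natAbs steps (binary strictly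
-- shrinks under // 10), so the fuel is never exhausted on Pre_; for binary < 0 the
-- Python loop diverges (excluded by Pre_).  pow(2, i) is ported as 2 ^ i.toNat,
-- exact for i ≥ 0, which holds whenever the loop body runs on Pre_.
def pvLoopA : Nat → Int → Int → Int → Int
  | 0, _, decimal, _ => decimal
  | fuel + 1, binary, decimal, i =>
    if binary = 0 then decimal
    else pvLoopA fuel (PySem.Int.floordiv binary 10)
          (decimal + PySem.Int.mod binary 10 * 2 ^ i.toNat) (i - 1)

def reversed_binary_to_decimal (binary : Int) : Int :=
  -- decimal, i, n = 0, len(str(binary))-1, 0   (n is dead)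
  pvLoopA (binary.natAbs + 1) binary 0 (((PySem.Int.toChars binary).length : Int) - 1)

-- ===== PORT B =====
-- for c in str(binary)[::-1]: n = n*2 + int(c).  int(c) is ported as c.toNat - 48,
-- exact for decimal digit characters — all characters of str(binary) on Pre_.
def reversed_binary_to_decimal_alt (binary : Int) : Int :=
  ((PySem.Int.toChars binary).reverse).foldl (fun n c => n * 2 + ((c.toNat : Int) - 48)) 0

-- ===== PRECONDITION & SPEC =====
-- Pre_ excludes negative inputs: there A's while loop never terminates (binary // 10
-- stays negative), and B raises ValueError on int('-').
def Pre_reversed_binary_to_decimal (binary : Int) : Prop := 0 ≤ binary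
instance (binary : Int) : Decidable (Pre_reversed_binary_to_decimal binary) := by
  unfold Pre_reversed_binary_to_decimal; infer_instance

def pvWitness_reversed_binary_to_decimal : Int := 110

def Spec_reversed_binary_to_decimal (binary : Int) (out : Int) : Prop := out = reversed_binary_to_decimal_alt binary
instance (binary : Int) (out : Int) : Decidable (Spec_reversed_binary_to_decimal binary out) := by unfold Spec_reversed_binary_to_decimal; infer_instance

-- ===== CLAIM (what is proved, stated in full; the proofs are below) =====
def Claim_equal_reversed_binary_to_decimal : Prop := ∀ (binary : Int), Dom_reversed_binary_to_decimal binary → Pre_reversed_binary_to_decimal binary → Spec_reversed_binary_to_decimal binary (reversed_binary_to_decimal binary)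

-- ===== LEMMAS AND PROOFS =====

-- Decimal digit characters of n, most significant first (= Nat.toDigits 10 n).
def pvD (n : Nat) : List Char :=
  if _h : n < 10 then [Nat.digitChar n]
  else pvD (n / 10) ++ [Nat.digitChar (n % 10)]
  decreasing_by exact Nat.div_lt_self (by omega) (by omega)

-- Decimal digit characters of n, least significant first; [] for 0.
def pvRevD (n : Nat) : List Char :=
  if h : n = 0 then []
  else Nat.digitChar (n % 10) :: pvRevD (n / 10)
  decreasing_by exact Nat.div_lt_self (by omega) (by omega)

-- Positional sum of an LSB-first digit list, the first digit weighted 2^i.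
def pvS : List Char → Nat → Int
  | [], _ => 0
  | c :: rest, i => ((c.toNat : Int) - 48) * 2 ^ i + pvS rest (i - 1)

lemma pvDigitChar_val {d : Nat} (h : d < 10) :
    ((Nat.digitChar d).toNat : Int) - 48 = (d : Int) := by
  interval_cases d <;> decide

lemma pvToDigitsCore_append (f : Nat) : ∀ (n : Nat) (acc : List Char),
    Nat.toDigitsCore 10 f n acc = Nat.toDigitsCore 10 f n [] ++ acc := by
  induction f with
  | zero => intro n acc; simp [Nat.toDigitsCore]
  | succ f ih =>
    intro n acc
    simp only [Nat.toDigitsCore]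
    by_cases h : n / 10 = 0
    · simp [h]
    · simp only [h, if_false]
      rw [ih (n / 10) (Nat.digitChar (n % 10) :: acc),
          ih (n / 10) (Nat.digitChar (n % 10) :: [])]
      simp

lemma pvToDigitsCore_eq_pvD : ∀ (f n : Nat), n < f →
    Nat.toDigitsCore 10 f n [] = pvD n := by
  intro f
  induction f with
  | zero => intro n h; omega
  | succ f ih =>
    intro n hn
    simp only [Nat.toDigitsCore]
    by_cases h : n / 10 = 0
    · have h10 : n < 10 := by omega
      rw [pvD, dif_pos h10]
      simp [h, Nat.mod_eq_of_lt h10]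
    · have h10 : ¬ n < 10 := by omega
      rw [pvD, dif_neg h10]
      simp only [h, if_false]
      rw [pvToDigitsCore_append, ih (n / 10) (by omega)]

lemma pvToDigits_eq_pvD (n : Nat) : Nat.toDigits 10 n = pvD n :=
  pvToDigitsCore_eq_pvD (n + 1) n (by omega)

lemma pvRevD_eq_reverse_pvD (n : Nat) (hn : n ≠ 0) :
    pvRevD n = (pvD n).reverse := by
  induction n using Nat.strong_induction_on with
  | _ n ih =>
    by_cases h : n < 10
    · rw [pvD, dif_pos h, pvRevD, dif_neg hn]
      have h0 : n / 10 = 0 := by omega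
      rw [pvRevD, dif_pos h0]
      simp [Nat.mod_eq_of_lt h]
    · rw [pvD, dif_neg h, pvRevD, dif_neg hn]
      rw [ih (n / 10) (Nat.div_lt_self (by omega) (by omega)) (by omega)]
      simp

lemma pvLoopA_zero (fuel : Nat) (dec i : Int) : pvLoopA fuel 0 dec i = dec := by
  cases fuel <;> simp [pvLoopA]

lemma pvLoopA_eq_pvS (n : Nat) : ∀ (fuel : Nat) (dec : Int) (i : Nat),
    n ≤ fuel → (pvRevD n).length ≤ i + 1 →
    pvLoopA fuel (n : Int) dec (i : Int) = dec + pvS (pvRevD n) i := by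
  induction n using Nat.strong_induction_on with
  | _ n ih =>
    intro fuel dec i hfuel hlen
    by_cases h0 : n = 0
    · subst h0
      rw [pvRevD, dif_pos rfl]
      simp [pvLoopA_zero, pvS]
    · have hfuel1 : 0 < fuel := by omega
      obtain ⟨f, rfl⟩ : ∃ f, fuel = f + 1 := ⟨fuel - 1, by omega⟩
      have hne : (n : Int) ≠ 0 := by exact_mod_cast h0
      rw [pvLoopA, if_neg hne]
      rw [pvRevD, dif_neg h0] at hlen ⊢
      have hmod : PySem.Int.mod (n : Int) 10 = ((n % 10 : Nat) : Int) :=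
        PySem.Int.mod_natCast n 10
      have hdiv : PySem.Int.floordiv (n : Int) 10 = ((n / 10 : Nat) : Int) :=
        PySem.Int.floordiv_natCast n 10
      have htoNat : ((i : Int)).toNat = i := Int.toNat_natCast i
      have hdivlt : n / 10 < n := Nat.div_lt_self (by omega) (by omega)
      simp only [List.length_cons] at hlen
      rcases i with _ | j
      · -- i = 0: the remaining digit list is empty, so n / 10 = 0
        have hnil : pvRevD (n / 10) = [] := by
          have := List.length_eq_zero_iff.mp (by omega : (pvRevD (n / 10)).length = 0)
          exact this
        have hq0 : n / 10 = 0 := by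
          by_contra hq
          rw [pvRevD, dif_neg hq] at hnil
          exact List.cons_ne_nil _ _ hnil
        rw [hdiv, hq0]
        have hr0 : pvRevD 0 = [] := by rw [pvRevD]; simp
        simp only [Nat.cast_zero, pvLoopA_zero, hmod]
        simp [pvS, hr0, pvDigitChar_val (Nat.mod_lt n (by omega))]
      · have hstep : ((j + 1 : Nat) : Int) - 1 = ((j : Nat) : Int) := by push_cast; ring
        rw [hdiv, hmod, htoNat, hstep,
            ih (n / 10) hdivlt f _ j (by omega) (by omega)]
        simp [pvS, pvDigitChar_val (Nat.mod_lt n (by omega))]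
        ring

lemma pvFoldl_horner (l : List Char) : ∀ a : Int,
    l.foldl (fun n c => n * 2 + ((c.toNat : Int) - 48)) a
      = a * 2 ^ l.length + pvS l (l.length - 1) := by
  induction l with
  | nil => intro a; simp [pvS]
  | cons c rest ih =>
    intro a
    simp only [List.foldl_cons, List.length_cons, ih]
    rw [pvS]
    have : (a * 2 + ((c.toNat : Int) - 48)) * 2 ^ rest.length
        = a * 2 ^ (rest.length + 1) + ((c.toNat : Int) - 48) * 2 ^ rest.length := by
      ring
    rw [this]
    have hlen : rest.length + 1 - 1 = rest.length := by omega
    rw [hlen]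
    ring

lemma pvD_ne_nil (n : Nat) : pvD n ≠ [] := by
  rw [pvD]
  split <;> simp

theorem reversed_binary_to_decimal_spec : Claim_equal_reversed_binary_to_decimal := by
  intro binary _ hpre
  unfold Spec_reversed_binary_to_decimal
  unfold Pre_reversed_binary_to_decimal at hpre
  obtain ⟨m, rfl⟩ : ∃ m : Nat, binary = (m : Int) :=
    ⟨binary.toNat, (Int.toNat_of_nonneg hpre).symm⟩
  by_cases h0 : m = 0
  · subst h0; decide
  · have hchars : PySem.Int.toChars (m : Int) = pvD m := by
      rw [PySem.Int.toChars]
      rw [if_neg (by omega)]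
      simp [pvToDigits_eq_pvD]
    have hlen1 : 1 ≤ (pvD m).length :=
      List.length_pos_iff.mpr (pvD_ne_nil m)
    have hrev := pvRevD_eq_reverse_pvD m h0
    have hlenrev : (pvRevD m).length = (pvD m).length := by
      rw [hrev]; simp
    unfold reversed_binary_to_decimal reversed_binary_to_decimal_alt
    rw [hchars, ← hrev]
    have hcast : (((pvD m).length : Int)) - 1 = (((pvD m).length - 1 : Nat) : Int) := by
      omega
    rw [hcast]
    rw [pvLoopA_eq_pvS m ((m : Int).natAbs + 1) 0 ((pvD m).length - 1)
      (by simp) (by omega)]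
    rw [pvFoldl_horner, hlenrev]
    have : ((pvD m).length - 1 : Nat) + 1 = (pvD m).length := by omega
    simp
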